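-- pv_equiv track=rewrite | github.com/alexdemenezes/trybe-projetos-backend-2 | sd-016-b-restaurant-orders/src/helpers/get_client_days_off.py | get_client_days_off
-- ===== SOURCE A (Python) =====
-- def get_client_days_off(list_of_orders, client_name):
--     set_of_different_days = set()
--     set_of_client_days = set()
--     for order in list_of_orders:
--         set_of_different_days.add(order[2])
--         if order[0] == client_name:
--             set_of_client_days.add(order[2])
--     return set_of_different_days - set_of_client_days
-- ===== SOURCE B (Python) =====
-- def get_client_days_off(list_of_orders, client_name):
--     clients_by_day = {}
--     for order in list_of_orders:
--         clients_by_day.setdefault(order[2], set()).add(order[0])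
--     days_off = set()
--     for day, clients in clients_by_day.items():
--         if client_name not in clients:
--             days_off.add(day)
--     return days_off
-- ===== Notes on version B (the rewrite author's own statement) =====
-- stated objective: alternative
-- what changed: Instead of maintaining two flat day-sets and subtracting them, B builds a grouped index mapping each day to the set of clients who ordered that day, then filters the index for days whose client set lacks client_name.
import Mathlib
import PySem

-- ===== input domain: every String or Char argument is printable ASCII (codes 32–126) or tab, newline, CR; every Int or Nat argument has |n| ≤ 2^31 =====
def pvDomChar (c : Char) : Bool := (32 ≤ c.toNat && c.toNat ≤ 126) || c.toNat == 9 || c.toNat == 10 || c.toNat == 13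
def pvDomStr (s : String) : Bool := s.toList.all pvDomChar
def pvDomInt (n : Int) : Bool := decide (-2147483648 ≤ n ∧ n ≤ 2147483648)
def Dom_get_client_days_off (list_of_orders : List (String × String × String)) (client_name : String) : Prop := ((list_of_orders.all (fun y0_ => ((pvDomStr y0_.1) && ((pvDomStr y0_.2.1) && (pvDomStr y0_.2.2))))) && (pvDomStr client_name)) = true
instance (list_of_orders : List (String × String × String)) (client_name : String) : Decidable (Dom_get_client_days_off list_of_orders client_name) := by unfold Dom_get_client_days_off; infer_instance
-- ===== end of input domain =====

-- B replaces A's two flat day-sets and set subtraction by a grouped index day → set of clients,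
-- filtered afterwards for days whose client set lacks client_name (alternative decomposition, same cost).
-- Both return a Python set; equality is proved for the canonical insertion-order list both ports produce.

-- ===== PORT A =====
def get_client_days_off (list_of_orders : List (String × String × String)) (client_name : String) : List String :=
  let sets := list_of_orders.foldl
    (fun (p : PySem.Set String × PySem.Set String) order =>
      (PySem.Set.add p.1 order.2.2,
       if order.1 == client_name then PySem.Set.add p.2 order.2.2 else p.2))
    (PySem.Set.empty, PySem.Set.empty)
  PySem.Set.diff sets.1 sets.2

-- ===== PORT B =====
def get_client_days_off_alt (list_of_orders : List (String × String × String)) (client_name : String) : List String :=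
  let clients_by_day := list_of_orders.foldl
    (fun (d : PySem.Dict String (PySem.Set String)) order =>
      d.modify order.2.2 PySem.Set.empty (fun s => PySem.Set.add s order.1))
    PySem.Dict.empty
  clients_by_day.items.foldl
    (fun (days_off : PySem.Set String) it =>
      if !PySem.Set.contains it.2 client_name then PySem.Set.add days_off it.1 else days_off)
    PySem.Set.empty

-- ===== PRECONDITION & SPEC =====
def Spec_get_client_days_off (list_of_orders : List (String × String × String)) (client_name : String) (out : List String) : Prop := out = get_client_days_off_alt list_of_orders client_name
instance (list_of_orders : List (String × String × String)) (client_name : String) (out : List String) : Decidable (Spec_get_client_days_off list_of_orders client_name out) := by unfold Spec_get_client_days_off; infer_instance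

-- ===== CLAIM (what is proved, stated in full; the proofs are below) =====
def Claim_equal_get_client_days_off : Prop := ∀ (list_of_orders : List (String × String × String)) (client_name : String), Dom_get_client_days_off list_of_orders client_name → Spec_get_client_days_off list_of_orders client_name (get_client_days_off list_of_orders client_name)

-- ===== LEMMAS AND PROOFS =====

-- A's single loop computes the two sets as updates by the day projections.
theorem pvA_fold (cn : String) (lo : List (String × String × String))
    (s1 s2 : PySem.Set String) :
    lo.foldl
      (fun (p : PySem.Set String × PySem.Set String) order =>
        (PySem.Set.add p.1 order.2.2,
         if order.1 == cn then PySem.Set.add p.2 order.2.2 else p.2))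
      (s1, s2)
    = (PySem.Set.update s1 (lo.map (·.2.2)),
       PySem.Set.update s2 ((lo.filter (fun o => o.1 == cn)).map (·.2.2))) := by
  induction lo generalizing s1 s2 with
  | nil => simp [PySem.Set.update]
  | cons o rest ih =>
      simp only [List.foldl_cons]
      rw [ih]
      by_cases h : o.1 = cn <;>
        simp [PySem.Set.update, h]

-- B's grouping loop: the client set stored at day k.
theorem pvB_getD (lo : List (String × String × String))
    (d : PySem.Dict String (PySem.Set String)) (k : String) :
    (lo.foldl
      (fun (d : PySem.Dict String (PySem.Set String)) order =>
        d.modify order.2.2 PySem.Set.empty (fun s => PySem.Set.add s order.1)) d).getD k PySem.Set.empty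
    = PySem.Set.update (d.getD k PySem.Set.empty)
        ((lo.filter (fun o => o.2.2 == k)).map (·.1)) := by
  induction lo generalizing d with
  | nil => simp [PySem.Set.update]
  | cons o rest ih =>
      simp only [List.foldl_cons]
      rw [ih, PySem.Dict.getD_modify]
      by_cases h : o.2.2 = k
      · simp [h, PySem.Set.update]
      · simp [h, Ne.symm h]

-- B's collecting loop over items with pairwise-distinct keys not yet in the accumulator appends.
theorem pvB_collect (cn : String) (l : List (String × PySem.Set String))
    (res : PySem.Set String)
    (hnd : (l.map (·.1)).Nodup)
    (hres : ∀ k ∈ l.map (·.1), res.contains k = false) :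
    l.foldl
      (fun (days_off : PySem.Set String) it =>
        if !PySem.Set.contains it.2 cn then PySem.Set.add days_off it.1 else days_off) res
    = res ++ (l.filter (fun it => !PySem.Set.contains it.2 cn)).map (·.1) := by
  induction l generalizing res with
  | nil => simp
  | cons p rest ih =>
      simp only [List.map_cons, List.nodup_cons] at hnd
      have hhead : res.contains p.1 = false := hres p.1 (by simp)
      have htail : ∀ k ∈ rest.map (·.1), res.contains k = false :=
        fun k hk => hres k (List.mem_cons_of_mem _ hk)
      by_cases h : cn ∈ p.2
      · rw [List.foldl_cons]
        have hif : (if (!PySem.Set.contains p.2 cn) = true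
            then PySem.Set.add res p.1 else res) = res := by
          simp [PySem.Set.contains, List.contains_eq_mem, h]
        rw [hif, ih res hnd.2 htail]
        simp [PySem.Set.contains, List.contains_eq_mem, h]
      · have hpm : p.1 ∉ res := by simpa using hhead
        have hadd : PySem.Set.add res p.1 = res ++ [p.1] := by
          simp [PySem.Set.add, PySem.Set.contains, hpm]
        rw [List.foldl_cons]
        have hif : (if (!PySem.Set.contains p.2 cn) = true
            then PySem.Set.add res p.1 else res) = res ++ [p.1] := by
          rw [if_pos (by simp [PySem.Set.contains, List.contains_eq_mem, h]), hadd]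
        have hres' : ∀ k ∈ rest.map (·.1), (res ++ [p.1]).contains k = false := by
          intro k hk
          have hne : p.1 ≠ k := fun e => hnd.1 (e ▸ hk)
          have hkres : k ∉ res := by simpa using htail k hk
          simp [List.mem_append, hkres, Ne.symm hne]
        rw [hif, ih (res ++ [p.1]) hnd.2 hres']
        simp [PySem.Set.contains, List.contains_eq_mem, h]

-- membership in the grouped client set of day k ↔ membership of k in A's client-day list
theorem pvMem_equiv (cn : String) (lo : List (String × String × String)) (k : String) :
    (cn ∈ ((lo.filter (fun o => o.2.2 == k)).map (·.1)))
    ↔ (k ∈ ((lo.filter (fun o => o.1 == cn)).map (·.2.2))) := by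
  simp only [List.mem_map, List.mem_filter, beq_iff_eq]
  constructor
  · rintro ⟨o, ⟨ho, hk⟩, hc⟩; exact ⟨o, ⟨ho, hc⟩, hk⟩
  · rintro ⟨o, ⟨ho, hc⟩, hk⟩; exact ⟨o, ⟨ho, hk⟩, hc⟩

-- ===== VERDICT (by name: the statement is the Claim_ definition above) =====
theorem get_client_days_off_spec : Claim_equal_get_client_days_off := by
  intro lo cn _
  show get_client_days_off lo cn = get_client_days_off_alt lo cn
  unfold get_client_days_off get_client_days_off_alt
  dsimp only
  rw [pvA_fold]
  set step := fun (d : PySem.Dict String (PySem.Set String)) (order : String × String × String) =>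
    d.modify order.2.2 PySem.Set.empty (fun s => PySem.Set.add s order.1) with hstep
  have hkeys : (lo.foldl step PySem.Dict.empty).keys
      = PySem.Set.ofList (lo.map (·.2.2)) := by
    rw [hstep]
    rw [PySem.Dict.keys_foldl_modify_key lo (fun o => o.2.2) PySem.Set.empty
      (fun _ o => (fun s => PySem.Set.add s o.1))]
    simp [PySem.Set.update_nil_left]
  have hnd : (lo.foldl step PySem.Dict.empty).keys.Nodup := by
    rw [hstep]
    exact PySem.Dict.nodup_keys_foldl_modify_key lo (fun o => o.2.2) PySem.Set.empty
      (fun _ o => (fun s => PySem.Set.add s o.1)) PySem.Dict.empty (by simp)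
  have hitems : (lo.foldl step PySem.Dict.empty).items
      = (lo.foldl step PySem.Dict.empty).keys.map
          (fun k => (k, (lo.foldl step PySem.Dict.empty).getD k PySem.Set.empty)) :=
    PySem.Dict.items_eq_map_keys _ hnd PySem.Set.empty
  rw [hitems]
  rw [pvB_collect cn _ PySem.Set.empty
      (by simpa [List.map_map, Function.comp_def] using hnd)
      (by intro k _; simp [PySem.Set.contains, PySem.Set.empty])]
  simp only [PySem.Set.diff, PySem.Set.empty, List.nil_append, List.filter_map, List.map_map,
    Function.comp_def, List.map_id']
  rw [hkeys]
  apply List.filter_congr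
  intro k hk
  rw [show ([] : PySem.Set String) = PySem.Set.empty from rfl, hstep, pvB_getD]
  simp only [PySem.Dict.getD_empty]
  simp [PySem.Set.contains, List.contains_eq_mem, PySem.Set.mem_ofList, pvMem_equiv cn lo k]
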